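-- pv_equiv track=rewrite | github.com/yusatll/CSE321-Introduction-to-Algorithm-Design | Homework 3/hw3.py | findMultiplications
-- ===== SOURCE A (Python) =====
-- def findMultiplications(sublists):
--     mult = []
--     t = 1
--     for i in range(0, len(sublists)):
--         for j in range(0, len(sublists[i])):
--             t *= sublists[i][j]
--         mult.append(t)
--         t = 1
--     return mult.index(min(mult))
-- ===== SOURCE B (Python) =====
-- def findMultiplications(sublists):
--     best_index = None
--     best_prod = None
--     for i, sub in enumerate(sublists):
--         p = 1
--         for x in sub:
--             p *= x
--         if best_prod is None or p < best_prod: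
--             best_index, best_prod = i, p
--     if best_index is None:
--         raise ValueError("min() arg is an empty sequence")
--     return best_index
-- ===== Notes on version B (the rewrite author's own statement) =====
-- stated objective: simpler
-- what changed: Single enumerate pass keeping running best_index/best_prod (strict < preserves first-minimum tie-breaking) instead of building the full product list and then scanning it twice with min() and list.index().
import Mathlib
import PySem

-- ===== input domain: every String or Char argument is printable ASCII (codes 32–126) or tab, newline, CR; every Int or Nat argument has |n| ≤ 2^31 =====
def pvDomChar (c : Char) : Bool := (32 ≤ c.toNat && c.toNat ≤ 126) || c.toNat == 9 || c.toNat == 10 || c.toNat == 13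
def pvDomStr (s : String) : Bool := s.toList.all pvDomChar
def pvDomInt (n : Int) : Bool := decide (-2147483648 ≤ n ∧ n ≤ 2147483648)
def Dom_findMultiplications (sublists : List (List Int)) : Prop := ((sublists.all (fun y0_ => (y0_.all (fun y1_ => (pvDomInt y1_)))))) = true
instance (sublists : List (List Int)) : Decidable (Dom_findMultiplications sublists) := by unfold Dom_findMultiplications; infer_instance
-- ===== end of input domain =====

-- B replaces A's build-product-list-then-min()/index() with a single pass keeping a running
-- best index/product (strict < keeps the first-minimum tie-breaking); simpler, one scan, no
-- intermediate list.  Pre_ excludes the empty list, on which A raises ValueError (min([])).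


-- ===== PORT A =====
def findMultiplications (sublists : List (List Int)) : Int :=
  let mult : List Int :=
    (PySem.List.pyRange 0 (PySem.List.len sublists) 1).foldl
      (fun mult i =>
        let sub := PySem.List.pyGetD sublists i []
        let t := (PySem.List.pyRange 0 (PySem.List.len sub) 1).foldl
          (fun t j => t * PySem.List.pyGetD sub j 0) 1
        mult ++ [t]) []
  match PySem.List.min? mult (fun x => x) with
  | some m =>
    match PySem.List.index? mult m with
    | some k => (k : Int)
    | none => 0      -- unreachable: the minimum is a member
  | none => 0        -- unreachable under Pre_: min([]) raises ValueError

-- ===== PORT B =====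
def pyProd (sub : List Int) : Int := sub.foldl (fun t x => t * x) 1

def altScan : List (List Int) → Int → Int → Int → Int
  | [], _, bestIdx, _ => bestIdx
  | sub :: rest, i, bestIdx, bestProd =>
    let p := pyProd sub
    if p < bestProd then altScan rest (i + 1) i p
    else altScan rest (i + 1) bestIdx bestProd

def findMultiplications_alt (sublists : List (List Int)) : Int :=
  match sublists with
  | [] => 0          -- unreachable under Pre_: B raises ValueError on the empty list
  | sub :: rest => altScan rest 1 0 (pyProd sub)

-- ===== PRECONDITION & SPEC =====
-- Pre_ excludes exactly the empty list: there A's min([]) raises ValueError (and B raises too).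
def Pre_findMultiplications (sublists : List (List Int)) : Prop := sublists ≠ []
instance (sublists : List (List Int)) : Decidable (Pre_findMultiplications sublists) := by unfold Pre_findMultiplications; infer_instance
def pvWitness_findMultiplications : List (List Int) := [[2, 3], [1], [0, 5]]

def Spec_findMultiplications (sublists : List (List Int)) (out : Int) : Prop := out = findMultiplications_alt sublists
instance (sublists : List (List Int)) (out : Int) : Decidable (Spec_findMultiplications sublists out) := by unfold Spec_findMultiplications; infer_instance

-- ===== CLAIM (what is proved, stated in full; the proofs are below) =====
def Claim_equal_findMultiplications : Prop := ∀ (sublists : List (List Int)), Dom_findMultiplications sublists → Pre_findMultiplications sublists → Spec_findMultiplications sublists (findMultiplications sublists)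

-- ===== LEMMAS AND PROOFS =====

-- the scan over products only, to factor pyProd out of altScan
def fScan : List Int → Int → Int → Int → Int
  | [], _, bestIdx, _ => bestIdx
  | x :: xs, i, bestIdx, bestProd =>
    if x < bestProd then fScan xs (i + 1) i x
    else fScan xs (i + 1) bestIdx bestProd

theorem altScan_eq_fScan (rest : List (List Int)) :
    ∀ i bIdx bP, altScan rest i bIdx bP = fScan (rest.map pyProd) i bIdx bP := by
  induction rest with
  | nil => intro i b p; rfl
  | cons s rs ih =>
    intro i b p
    simp only [altScan, List.map, fScan]
    split_ifs <;> exact ih _ _ _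

theorem foldl_min_min (ys : List Int) : ∀ x y, ys.foldl min (min x y) = min x (ys.foldl min y) := by
  induction ys with
  | nil => intro x y; rfl
  | cons z zs ih =>
    intro x y
    simp only [List.foldl]
    rw [min_assoc, ih]

theorem min?_id_cons_cons (x : Int) (t : List Int) (m : Int)
    (h : PySem.List.min? t (fun y => y) = some m) :
    PySem.List.min? (x :: t) (fun y => y) = some (min x m) := by
  cases t with
  | nil => simp [PySem.List.min?] at h
  | cons y ys =>
    rw [PySem.List.min?_id_cons] at h ⊢
    have hm : ys.foldl min y = m := by injection h
    simp only [List.foldl]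
    rw [foldl_min_min, hm]

-- the key characterisation of the single-pass scan
theorem fScan_spec (xs : List Int) :
    ∀ (i bIdx bP : Int), fScan xs i bIdx bP =
      match PySem.List.min? xs (fun y => y) with
      | none => bIdx
      | some m => if m < bP then i + (((PySem.List.index? xs m).getD 0 : Nat) : Int) else bIdx := by
  induction xs with
  | nil => intro i b p; rfl
  | cons x t ih =>
    intro i bIdx bP
    simp only [fScan]
    cases ht : PySem.List.min? t (fun y => y) with
    | none =>
      have ht' : t = [] := (PySem.List.min?_eq_none_iff t _).mp ht
      subst ht'
      rw [PySem.List.min?_id_cons]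
      simp only [List.foldl, fScan, PySem.List.index?_cons_self, Option.getD_some]
      split_ifs <;> simp
    | some m =>
      have hmem : m ∈ t := PySem.List.min?_mem ht
      obtain ⟨k, hk⟩ : ∃ k, PySem.List.index? t m = some k :=
        Option.isSome_iff_exists.mp ((PySem.List.index?_isSome_iff t m).mpr hmem)
      have hcons := min?_id_cons_cons x t m ht
      rw [hcons]
      simp only []
      by_cases h1 : x < bP
      · -- x < bP : first element becomes the best
        rw [if_pos h1, ih, ht]
        simp only []
        by_cases h2 : m < x
        · have hne : x ≠ m := by omega
          have hmin : min x m = m := by omega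
          rw [hmin, PySem.List.index?_cons_of_ne t hne, hk,
            if_pos h2, if_pos (by omega : m < bP)]
          simp only [Option.map_some, Option.getD_some]
          push_cast
          ring
        · have hmin : min x m = x := by omega
          rw [hmin, PySem.List.index?_cons_self, if_neg h2, if_pos h1]
          simp
      · -- bP ≤ x : best stays
        rw [if_neg h1, ih, ht]
        simp only []
        by_cases h2 : m < bP
        · have h3 : m < x := by omega
          have hne : x ≠ m := by omega
          have hmin : min x m = m := by omega
          rw [hmin, PySem.List.index?_cons_of_ne t hne, hk, if_pos h2, if_pos h2]
          simp only [Option.map_some, Option.getD_some]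
          push_cast
          ring
        · have hmin : ¬ min x m < bP := by omega
          rw [if_neg h2, if_neg hmin]

-- A's product list is just the map of products
theorem foldl_append_map (g : List Int → Int) (l : List (List Int)) :
    ∀ acc : List Int, l.foldl (fun acc s => acc ++ [g s]) acc = acc ++ l.map g := by
  induction l with
  | nil => intro acc; simp
  | cons s rs ih => intro acc; simp [List.foldl, ih]

theorem mult_eq_map (sublists : List (List Int)) :
    (PySem.List.pyRange 0 (PySem.List.len sublists) 1).foldl
      (fun mult i =>
        let sub := PySem.List.pyGetD sublists i []
        let t := (PySem.List.pyRange 0 (PySem.List.len sub) 1).foldl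
          (fun t j => t * PySem.List.pyGetD sub j 0) 1
        mult ++ [t]) [] = sublists.map pyProd := by
  have houter := PySem.List.foldl_pyRange_zero_pyGetD sublists []
    (fun (mult : List Int) (sub : List Int) =>
      mult ++ [(PySem.List.pyRange 0 (PySem.List.len sub) 1).foldl
        (fun t j => t * PySem.List.pyGetD sub j 0) 1]) []
  simp only at houter
  rw [houter]
  have hinner : ∀ sub : List Int,
      (PySem.List.pyRange 0 (PySem.List.len sub) 1).foldl
        (fun t j => t * PySem.List.pyGetD sub j 0) 1 = pyProd sub := by
    intro sub
    exact PySem.List.foldl_pyRange_zero_pyGetD sub 0 (fun t x => t * x) 1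
  calc List.foldl (fun mult sub => mult ++ [(PySem.List.pyRange 0 (PySem.List.len sub) 1).foldl
          (fun t j => t * PySem.List.pyGetD sub j 0) 1]) [] sublists
      = List.foldl (fun mult sub => mult ++ [pyProd sub]) [] sublists := by
        apply PySem.List.foldl_congr_mem
        intro acc s _
        rw [hinner]
    _ = sublists.map pyProd := by simpa using foldl_append_map pyProd sublists []

-- ===== VERDICT (by name: the statement is the Claim_ definition above) =====
theorem findMultiplications_spec : Claim_equal_findMultiplications := by
  intro sublists _hdom hpre
  unfold Spec_findMultiplications
  unfold Pre_findMultiplications at hpre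
  cases hs : sublists with
  | nil => exact absurd hs hpre
  | cons s rest =>
    unfold findMultiplications findMultiplications_alt
    simp only [mult_eq_map, List.map]
    rw [altScan_eq_fScan, fScan_spec]
    generalize pyProd s = x
    generalize List.map pyProd rest = xs
    cases ht : PySem.List.min? xs (fun y => y) with
    | none =>
      have ht' : xs = [] := (PySem.List.min?_eq_none_iff xs _).mp ht
      subst ht'
      rw [PySem.List.min?_id_cons]
      simp only [List.foldl]
      rw [PySem.List.index?_cons_self]
      simp
    | some m =>
      have hmem : m ∈ xs := PySem.List.min?_mem ht
      obtain ⟨k, hk⟩ : ∃ k, PySem.List.index? xs m = some k :=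
        Option.isSome_iff_exists.mp ((PySem.List.index?_isSome_iff xs m).mpr hmem)
      rw [min?_id_cons_cons x xs m ht]
      simp only []
      by_cases h2 : m < x
      · have hne : x ≠ m := by omega
        have hmin : min x m = m := by omega
        rw [hmin, PySem.List.index?_cons_of_ne xs hne, hk, if_pos h2]
        simp only [Option.map_some, Option.getD_some]
        push_cast
        ring
      · have hmin : min x m = x := by omega
        rw [hmin, PySem.List.index?_cons_self, if_neg h2]
        rfl
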